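-- pv_equiv track=rewrite | github.com/OpenSN-Library/OpenSN-Library | sub-modules/PositionProvider/address_allocator.py | array_add
-- ===== SOURCE A (Python) =====
-- def array_add(base: list,delta: int) -> list:
--     ret = [base[i] for i in range(len(base))]
--     for i in range(len(base)-1,-1,-1):
--         if delta == 0 :
--             break
--         delta = delta + base[i]
--         ret[i] = delta % 256
--         delta = delta // 256
--     return ret
-- ===== SOURCE B (Python) =====
-- def array_add(base: list, delta: int) -> list:
--     # Closed form: fold the digits into one big-endian base-256 integer, add delta,
--     # wrap modulo 256**n, and decompose back into exactly n digits.
--     n = len(base)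
--     value = 0
--     for d in base:
--         value = value * 256 + d
--     total = (value + delta) % (256 ** n)
--     out = []
--     for _ in range(n):
--         total, r = divmod(total, 256)
--         out.append(r)
--     return out[::-1]
-- ===== Notes on version B (the rewrite author's own statement) =====
-- stated objective: alternative
-- what changed: B replaces A's right-to-left per-digit carry loop (copy, mutate in place, break when the carry dies) by a closed form: fold the digits into one big-endian base-256 integer, add delta, reduce modulo 256**n, and decompose back into n digits.
-- outside the precondition, e.g. on array_add([300, 5], 1): A returns [300, 6], B returns [44, 6]
import Mathlib
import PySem

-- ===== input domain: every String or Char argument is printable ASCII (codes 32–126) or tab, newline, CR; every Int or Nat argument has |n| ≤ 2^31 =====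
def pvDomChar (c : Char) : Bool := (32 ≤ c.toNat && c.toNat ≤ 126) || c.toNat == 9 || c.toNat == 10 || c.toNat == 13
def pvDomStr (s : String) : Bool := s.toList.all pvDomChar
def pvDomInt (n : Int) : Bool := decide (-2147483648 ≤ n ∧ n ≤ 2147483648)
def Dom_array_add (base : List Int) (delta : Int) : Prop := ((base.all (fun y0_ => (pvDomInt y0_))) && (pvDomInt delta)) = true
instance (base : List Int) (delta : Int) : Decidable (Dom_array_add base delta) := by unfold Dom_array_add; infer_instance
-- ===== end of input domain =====

-- B replaces A's right-to-left digit carry loop by a closed form: fold the digit list into one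
-- big-endian base-256 integer, add delta, wrap modulo 256^n and decompose back into n digits
-- (objective: alternative; Pre_ only excludes inputs whose carry dies early before an
-- out-of-range entry, where A keeps the malformed digit and B normalizes it).


-- ===== PORT A =====
-- for i in range(len(base)-1,-1,-1): if delta == 0: break; …  (indices are always in range,
-- so base[i] is ported as (pyGet? base i).getD 0)
def array_add_loop (base : List Int) : List Int → List Int → Int → List Int
  | [], ret, _ => ret
  | i :: rest, ret, delta =>
    if delta = 0 then ret
    else
      let d := delta + (PySem.List.pyGet? base i).getD 0
      array_add_loop base rest (ret.set i.toNat (PySem.Int.mod d 256)) (PySem.Int.floordiv d 256)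

def array_add (base : List Int) (delta : Int) : List Int :=
  -- ret = [base[i] for i in range(len(base))]
  let ret := (List.range base.length).map (fun i => (PySem.List.pyGet? base (Int.ofNat i)).getD 0)
  array_add_loop base (PySem.List.pyRange ((base.length : Int) - 1) (-1) (-1)) ret delta

-- ===== PORT B =====
-- for _ in range(n): total, r = divmod(total, 256); out.append(r);  return out[::-1]
def array_add_alt_decomp : Nat → Int → List Int → List Int
  | 0, _, out => out.reverse
  | k + 1, total, out =>
      array_add_alt_decomp k (PySem.Int.floordiv total 256) (out ++ [PySem.Int.mod total 256])

-- value = 0; for d in base: value = value*256 + d;  total = (value + delta) % (256 ** n)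
def array_add_alt (base : List Int) (delta : Int) : List Int :=
  let n := base.length
  let value := base.foldl (fun t d => t * 256 + d) 0
  let total := PySem.Int.mod (value + delta) ((256 : Int) ^ n)
  array_add_alt_decomp n total []

-- ===== PRECONDITION & SPEC =====
-- value of a digit list as a big-endian base-256 integer (B's left fold; used to state Pre_)
def valOf (xs : List Int) : Int := xs.foldl (fun t d => t * 256 + d) 0

-- Pre_ excludes only malformed inputs: A's carry dies after k digits exactly when the value of the
-- processed k-digit suffix plus delta lands in [0, 256^k), and then A leaves the remaining prefix
-- untouched; if that prefix has an entry outside 0..255 it is not a base-256 digit array, A keeps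
-- the out-of-range entry while B normalizes it, and neither value is specified.
def Pre_array_add (base : List Int) (delta : Int) : Prop :=
  ∀ k < base.length,
    (0 ≤ valOf (base.drop (base.length - k)) + delta ∧
       valOf (base.drop (base.length - k)) + delta < 256 ^ k) →
    ∀ x ∈ base.take (base.length - k), 0 ≤ x ∧ x < 256
instance (base : List Int) (delta : Int) : Decidable (Pre_array_add base delta) := by unfold Pre_array_add; infer_instance
def pvWitness_array_add : List Int × Int := ([10, 0, 255], 1000)

def Spec_array_add (base : List Int) (delta : Int) (out : List Int) : Prop := out = array_add_alt base delta
instance (base : List Int) (delta : Int) (out : List Int) : Decidable (Spec_array_add base delta out) := by unfold Spec_array_add; infer_instance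

-- ===== CLAIM (what is proved, stated in full; the proofs are below) =====
def Claim_equal_array_add : Prop := ∀ (base : List Int) (delta : Int), Dom_array_add base delta → Pre_array_add base delta → Spec_array_add base delta (array_add base delta)

-- ===== LEMMAS AND PROOFS =====

-- big-endian n-digit decomposition (proof-side characterisation of B's divmod loop)
def digitsBE : Nat → Int → List Int
  | 0, _ => []
  | k + 1, x => digitsBE k (x / 256) ++ [x % 256]

lemma valOf_append (xs : List Int) (b : Int) : valOf (xs ++ [b]) = valOf xs * 256 + b := by
  simp [valOf, List.foldl_append]

lemma valOf_bounds (xs : List Int) (h : ∀ x ∈ xs, 0 ≤ x ∧ x < 256) :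
    0 ≤ valOf xs ∧ valOf xs < 256 ^ xs.length := by
  induction xs using List.reverseRecOn with
  | nil => simp [valOf]
  | append_singleton ys b ih =>
    have hb := h b (by simp)
    have hys := ih (fun x hx => h x (by simp [hx]))
    rw [valOf_append]
    constructor
    · nlinarith [hys.1, hb.1]
    · have : valOf ys + 1 ≤ 256 ^ ys.length := hys.2
      calc valOf ys * 256 + b < (valOf ys + 1) * 256 := by omega
        _ ≤ 256 ^ ys.length * 256 := by nlinarith
        _ = 256 ^ (ys ++ [b]).length := by simp [pow_succ]

lemma digitsBE_valOf (xs : List Int) (h : ∀ x ∈ xs, 0 ≤ x ∧ x < 256) :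
    digitsBE xs.length (valOf xs) = xs := by
  induction xs using List.reverseRecOn with
  | nil => simp [digitsBE]
  | append_singleton ys b ih =>
    have hb := h b (by simp)
    have hys := valOf_bounds ys (fun x hx => h x (by simp [hx]))
    have hlen : (ys ++ [b]).length = ys.length + 1 := by simp
    rw [hlen, valOf_append, digitsBE]
    have hdiv : (valOf ys * 256 + b) / 256 = valOf ys := by omega
    have hmod : (valOf ys * 256 + b) % 256 = b := by omega
    rw [hdiv, hmod, ih (fun x hx => h x (by simp [hx]))]

-- the comprehension copy is base itself
lemma copy_eq (base : List Int) :
    (List.range base.length).map (fun i => (PySem.List.pyGet? base (Int.ofNat i)).getD 0) = base := by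
  apply List.ext_getElem
  · simp
  · intro k h1 h2
    simp at h1
    simp [PySem.List.pyGet?_natCast, h1]

-- splitting x mod 256^(m+1) into its last digit and the rest
lemma mod_split (x N : Int) (_hN : 0 < N) :
    x % (256 * N) % 256 = x % 256 ∧ x % (256 * N) / 256 = x / 256 % N := by
  constructor
  · exact Int.emod_emod_of_dvd x (dvd_mul_right 256 N)
  · have hq : x % (256 * N) = x + (-(N * (x / (256 * N)))) * 256 := by
      rw [Int.emod_def]; ring
    have hdd : x / 256 / N = x / (256 * N) := Int.ediv_ediv_of_nonneg (by norm_num)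
    rw [hq, Int.add_mul_ediv_right _ _ (by norm_num : (256:Int) ≠ 0), Int.emod_def, hdd]
    ring

-- loop invariant: whenever the carry dies with j digits processed, the untouched prefix is in range
def loopHyp (base : List Int) (i : Nat) (delta : Int) : Prop :=
  ∀ j < i, (0 ≤ valOf ((base.take i).drop (i - j)) + delta ∧
      valOf ((base.take i).drop (i - j)) + delta < 256 ^ j) →
    ∀ x ∈ base.take (i - j), 0 ≤ x ∧ x < 256

lemma pre_imp (base : List Int) (delta : Int) (h : Pre_array_add base delta) :
    loopHyp base base.length delta := by
  intro j hj hbnd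
  simp only [List.take_length] at hbnd
  exact h j hj hbnd

-- A's countdown loop computes the closed form on the processed suffix
lemma loop_eq (base : List Int) :
    ∀ (i : Nat), i ≤ base.length → ∀ (delta : Int) (s : List Int), loopHyp base i delta →
    array_add_loop base (PySem.List.pyRange ((i : Int) - 1) (-1) (-1)) (base.take i ++ s) delta
      = digitsBE i ((valOf (base.take i) + delta) % 256 ^ i) ++ s := by
  intro i
  induction i with
  | zero =>
    intro _ delta s _
    rw [PySem.List.pyRange_neg_one_eq_nil (by omega)]
    simp [array_add_loop, digitsBE]
  | succ m ih =>
    intro hle delta s hyp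
    have hm : ((m + 1 : Nat) : Int) - 1 = (m : Int) := by push_cast; ring
    rw [PySem.List.pyRange_neg_one_cons (by push_cast; omega), hm]
    have hmlt : m < base.length := by omega
    have htk : base.take (m + 1) = base.take m ++ [base[m]] := by
      rw [List.take_add_one, List.getElem?_eq_getElem hmlt]; rfl
    have hvlen : (base.take (m + 1)).length = m + 1 := by simp; omega
    by_cases hd : delta = 0
    · subst hd
      simp only [array_add_loop]
      rw [if_true]
      -- the carry is dead with 0 digits processed, so the whole prefix is in range
      have hdrop : (base.take (m + 1)).drop (m + 1 - 0) = [] :=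
        List.drop_eq_nil_of_le (by rw [hvlen]; omega)
      have hrange := hyp 0 (Nat.succ_pos m) (by rw [hdrop]; simp [valOf])
      simp only [Nat.sub_zero] at hrange
      have hvb := valOf_bounds (base.take (m + 1)) hrange
      have h2 := digitsBE_valOf (base.take (m + 1)) hrange
      rw [hvlen] at h2
      have hlt := hvb.2
      rw [hvlen] at hlt
      rw [add_zero, Int.emod_eq_of_lt hvb.1 hlt, h2]
    · simp only [array_add_loop, if_neg hd]
      have hget : (PySem.List.pyGet? base ((m : Int))).getD 0 = base[m] := by
        simp [hmlt]
      set d := delta + (PySem.List.pyGet? base ((m : Int))).getD 0 with hdef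
      have hdb : d = delta + base[m] := by rw [hdef, hget]
      have hfd : PySem.Int.floordiv d 256 = d / 256 :=
        PySem.Int.floordiv_eq_ediv_of_pos (by norm_num)
      have hpm : PySem.Int.mod d 256 = d % 256 :=
        PySem.Int.mod_eq_emod_of_pos (by norm_num)
      have hset : (base.take (m + 1) ++ s).set (Int.toNat (m : Int)) (PySem.Int.mod d 256)
          = base.take m ++ ([PySem.Int.mod d 256] ++ s) := by
        rw [htk, List.append_assoc,
          List.set_append_right _ _ (by simp [List.length_take]; try omega)]
        simp [List.length_take, Nat.min_eq_left (le_of_lt hmlt)]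
      -- the invariant carries over to the shorter prefix with the new carry
      have hyp' : loopHyp base m (PySem.Int.floordiv d 256) := by
        intro j hj hbnd
        have hds : (base.take (m + 1)).drop (m + 1 - (j + 1))
            = (base.take m).drop (m - j) ++ [base[m]] := by
          rw [htk]
          have hmj : m + 1 - (j + 1) = m - j := by omega
          rw [hmj, List.drop_append_of_le_length (by simp [List.length_take]; omega)]
        have hw := hyp (j + 1) (by omega) (by
          rw [hds, valOf_append, hfd] at *
          have hNj : (0 : Int) < 256 ^ j := by positivity
          have hpj : (256 : Int) ^ (j + 1) = 256 ^ j * 256 := pow_succ 256 j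
          rw [hpj]
          omega)
        have hmj : m + 1 - (j + 1) = m - j := by omega
        rw [hmj] at hw
        exact hw
      rw [hset, ih (by omega) _ _ hyp']
      -- arithmetic: peel the last digit off the closed form
      have hNpos : (0 : Int) < 256 ^ m := by positivity
      obtain ⟨hm1, hm2⟩ := mod_split (valOf (base.take (m + 1)) + delta) (256 ^ m) hNpos
      have hpow : (256 : Int) ^ (m + 1) = 256 * 256 ^ m := by ring
      have hval : valOf (base.take (m + 1)) + delta = valOf (base.take m) * 256 + d := by
        rw [htk, valOf_append, hdb]; ring
      rw [digitsBE, hpow, ← List.append_assoc]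
      congr 2
      · rw [hm2, hval, hfd]
        have hq : (valOf (base.take m) * 256 + d) / 256 = valOf (base.take m) + d / 256 := by
          omega
        rw [hq]
      · rw [hm1, hval, hpm]
        congr 1
        omega

-- B's divmod loop produces digitsBE
lemma decomp_eq : ∀ (k : Nat) (x : Int) (out : List Int),
    array_add_alt_decomp k x out = digitsBE k x ++ out.reverse := by
  intro k
  induction k with
  | zero => intro x out; simp [array_add_alt_decomp, digitsBE]
  | succ m ih =>
    intro x out
    rw [array_add_alt_decomp, ih, digitsBE,
      PySem.Int.floordiv_eq_ediv_of_pos (by norm_num),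
      PySem.Int.mod_eq_emod_of_pos (by norm_num)]
    simp

-- ===== VERDICT (by name: the statement is the Claim_ definition above) =====
theorem array_add_spec : Claim_equal_array_add := by
  intro base delta _ hpre
  show array_add base delta = array_add_alt base delta
  unfold array_add array_add_alt
  rw [copy_eq]
  have h := loop_eq base base.length (le_refl _) delta [] (pre_imp base delta hpre)
  simp only [List.take_length, List.append_nil] at h
  rw [h, decomp_eq]
  rw [PySem.Int.mod_eq_emod_of_pos (by positivity)]
  simp [valOf]
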